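-- pv_equiv track=rewrite | github.com/markvp/hacs_waste_collection_schedule | scripts/remove_icon_maps.py | remove_icon_map_block
-- ===== SOURCE A (Python) =====
-- def remove_icon_map_block(source, start_line, end_line):
--     """Remove the ICON_MAP block from source code."""
--     lines = source.splitlines(True)
--     new_lines = lines[:start_line - 1] + lines[end_line:]
--
--     # Clean up extra blank lines
--     result = []
--     prev_blank = False
--     for line in new_lines:
--         is_blank = line.strip() == ""
--         if is_blank and prev_blank:
--             continue
--         result.append(line)
--         prev_blank = is_blank
--
--     return "".join(result)
-- ===== SOURCE B (Python) =====
-- def remove_icon_map_block(source, start_line, end_line):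
--     """Remove the ICON_MAP block from source code."""
--     lines = source.splitlines(True)
--     new_lines = lines[:start_line - 1] + lines[end_line:]
--
--     # Collapse runs of blank lines: scan maximal runs of equal blankness,
--     # keep only the first line of a blank run, keep non-blank runs whole.
--     result = []
--     i = 0
--     n = len(new_lines)
--     while i < n:
--         blank = new_lines[i].strip() == ""
--         j = i + 1
--         while j < n and (new_lines[j].strip() == "") == blank:
--             j += 1
--         if blank:
--             result.append(new_lines[i])
--         else:
--             result.extend(new_lines[i:j])
--         i = j
--     return "".join(result)
-- ===== Notes on version B (the rewrite author's own statement) =====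
-- stated objective: alternative
-- what changed: Blank-line collapsing is done by scanning maximal runs of equal blankness with a two-pointer loop (keep first line of a blank run, keep non-blank runs whole) instead of A's per-line prev_blank flag and conditional skip.
import Mathlib
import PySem

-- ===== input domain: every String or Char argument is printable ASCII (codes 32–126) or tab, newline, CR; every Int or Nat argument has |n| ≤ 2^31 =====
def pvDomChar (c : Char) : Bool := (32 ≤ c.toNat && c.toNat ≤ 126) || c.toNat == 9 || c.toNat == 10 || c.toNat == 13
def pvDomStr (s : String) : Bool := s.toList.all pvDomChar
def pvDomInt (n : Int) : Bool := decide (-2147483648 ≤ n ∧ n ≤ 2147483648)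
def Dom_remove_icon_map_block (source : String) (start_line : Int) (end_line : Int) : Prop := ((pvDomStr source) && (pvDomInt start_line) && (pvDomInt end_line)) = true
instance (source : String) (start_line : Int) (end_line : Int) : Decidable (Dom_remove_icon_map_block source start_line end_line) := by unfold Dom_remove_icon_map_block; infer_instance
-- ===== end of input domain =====

-- B collapses blank lines by scanning maximal runs of equal blankness (keep the first line of a
-- blank run, keep non-blank runs whole) instead of A's per-line prev_blank flag; same result.

-- shared port of the builtin source.splitlines(True): exact on Dom, where the only
-- line boundaries are '\n', '\r' and '\r\n' (keepends)
def pvSplitlinesKeep (cs : List Char) (acc : List Char) : List (List Char) :=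
  match cs with
  | [] => if acc = [] then [] else [acc.reverse]
  | '\r' :: '\n' :: rest => (acc.reverse ++ ['\r', '\n']) :: pvSplitlinesKeep rest []
  | '\r' :: rest => (acc.reverse ++ ['\r']) :: pvSplitlinesKeep rest []
  | '\n' :: rest => (acc.reverse ++ ['\n']) :: pvSplitlinesKeep rest []
  | c :: rest => pvSplitlinesKeep rest (c :: acc)
termination_by cs.length

-- shared port of the expression line.strip() == ""
def pvIsBlank (l : List Char) : Bool := PySem.Chars.strip l == []

-- the body of A's for-loop as a step function on the state (result, prev_blank)
def pvStepA (st : List (List Char) × Bool) (line : List Char) : List (List Char) × Bool :=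
  let is_blank := pvIsBlank line
  if is_blank && st.2 then st
  else (st.1 ++ [line], is_blank)

-- ===== PORT A =====
def remove_icon_map_block (source : String) (start_line : Int) (end_line : Int) : String :=
  let lines := pvSplitlinesKeep source.toList []
  let new_lines := PySem.List.slice lines none (some (start_line - 1)) ++
                   PySem.List.slice lines (some end_line) none
  -- result = []; prev_blank = False; for line in new_lines: …
  let st := new_lines.foldl pvStepA ([], false)
  String.ofList st.1.flatten      -- "".join(result)

-- ===== PORT B =====
-- the outer while loop of B: take a maximal run of lines with the same blankness,
-- emit the first line (blank run) or the whole run (non-blank), continue after it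
def pvRuns (new_lines : List (List Char)) : List (List Char) :=
  match new_lines with
  | [] => []
  | x :: xs =>
    let blank := pvIsBlank x
    (if blank then [x] else x :: xs.takeWhile (fun y => pvIsBlank y == blank)) ++
      pvRuns (xs.dropWhile (fun y => pvIsBlank y == blank))
termination_by new_lines.length
decreasing_by simp; exact List.length_dropWhile_le _ _

def remove_icon_map_block_alt (source : String) (start_line : Int) (end_line : Int) : String :=
  let lines := pvSplitlinesKeep source.toList []
  let new_lines := PySem.List.slice lines none (some (start_line - 1)) ++
                   PySem.List.slice lines (some end_line) none
  String.ofList (pvRuns new_lines).flatten      -- "".join(result)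

-- ===== PRECONDITION & SPEC =====
def Spec_remove_icon_map_block (source : String) (start_line : Int) (end_line : Int) (out : String) : Prop := out = remove_icon_map_block_alt source start_line end_line
instance (source : String) (start_line : Int) (end_line : Int) (out : String) : Decidable (Spec_remove_icon_map_block source start_line end_line out) := by unfold Spec_remove_icon_map_block; infer_instance

-- ===== CLAIM (what is proved, stated in full; the proofs are below) =====
def Claim_equal_remove_icon_map_block : Prop := ∀ (source : String) (start_line : Int) (end_line : Int), Dom_remove_icon_map_block source start_line end_line → Spec_remove_icon_map_block source start_line end_line (remove_icon_map_block source start_line end_line)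

-- ===== LEMMAS AND PROOFS =====

-- reference recursion: A's loop as a function of the remaining lines and prev_blank
def pvCollapse (prev : Bool) : List (List Char) → List (List Char)
  | [] => []
  | l :: ls => if pvIsBlank l && prev then pvCollapse prev ls
               else l :: pvCollapse (pvIsBlank l) ls

theorem pvFoldl_eq_collapse (xs : List (List Char)) (acc : List (List Char)) (prev : Bool) :
    (xs.foldl pvStepA (acc, prev)).1 = acc ++ pvCollapse prev xs := by
  induction xs generalizing acc prev with
  | nil => simp [pvCollapse]
  | cons l ls ih =>
    rw [List.foldl_cons]
    by_cases h : (pvIsBlank l && prev) = true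
    · have hstep : pvStepA (acc, prev) l = (acc, prev) := by simp [pvStepA, h]
      rw [hstep, ih]
      simp [pvCollapse, h]
    · have hstep : pvStepA (acc, prev) l = (acc ++ [l], pvIsBlank l) := by
        have h' : (pvIsBlank l && prev) = false := by simpa using h
        simp [pvStepA, h']
      rw [hstep, ih]
      simp [pvCollapse, h]

theorem pvCollapse_true_eq (xs : List (List Char)) :
    pvCollapse true xs = pvCollapse false (xs.dropWhile pvIsBlank) := by
  induction xs with
  | nil => simp [pvCollapse]
  | cons l ls ih =>
    by_cases h : pvIsBlank l = true
    · simp [pvCollapse, h, ih]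
    · simp [pvCollapse, h]

theorem pvCollapse_false_append (t rest : List (List Char))
    (ht : ∀ y ∈ t, pvIsBlank y = false) :
    pvCollapse false (t ++ rest) = t ++ pvCollapse false rest := by
  induction t with
  | nil => simp
  | cons y t' ih =>
    have hy : pvIsBlank y = false := ht y (by simp)
    simp only [List.cons_append, pvCollapse, hy]
    simp [ih (fun z hz => ht z (by simp [hz]))]

theorem pvRuns_eq_collapse (xs : List (List Char)) :
    pvRuns xs = pvCollapse false xs := by
  induction hn : xs.length using Nat.strong_induction_on generalizing xs with
  | _ n ih =>
  match xs with
  | [] => rw [pvRuns.eq_def]; simp [pvCollapse]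
  | x :: ls =>
    rw [pvRuns.eq_def]
    dsimp only
    have hrec : pvRuns (ls.dropWhile (fun y => pvIsBlank y == pvIsBlank x)) =
        pvCollapse false (ls.dropWhile (fun y => pvIsBlank y == pvIsBlank x)) :=
      ih _ (by subst hn; exact Nat.lt_succ_of_le (List.length_dropWhile_le _ _)) _ rfl
    rw [hrec]
    by_cases h : pvIsBlank x = true
    · -- blank run: keep only x, continue after the blanks
      have hkey : (fun y => pvIsBlank y == pvIsBlank x) = pvIsBlank := by
        funext y; rw [h]; cases pvIsBlank y <;> simp
      rw [hkey, ← pvCollapse_true_eq]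
      simp [h, pvCollapse]
    · -- non-blank run: emit the whole run
      have hb : pvIsBlank x = false := by simpa using h
      have hkey : (fun y => pvIsBlank y == pvIsBlank x) = (fun y => !pvIsBlank y) := by
        funext y; rw [hb]; cases pvIsBlank y <;> simp
      rw [hkey]
      have htw : ∀ y ∈ ls.takeWhile (fun y => !pvIsBlank y), pvIsBlank y = false := by
        intro y hy
        simpa using List.mem_takeWhile_imp hy
      have hsplit : pvCollapse false (x :: ls) = x :: pvCollapse false ls := by
        simp [pvCollapse, hb]
      rw [hsplit, hb]
      conv_rhs => rw [← List.takeWhile_append_dropWhile (p := fun y => !pvIsBlank y) (l := ls)]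
      rw [pvCollapse_false_append _ _ htw]
      simp

-- ===== VERDICT (by name: the statement is the Claim_ definition above) =====
theorem remove_icon_map_block_spec : Claim_equal_remove_icon_map_block := by
  intro source start_line end_line _
  show _ = _
  unfold remove_icon_map_block remove_icon_map_block_alt
  simp only [pvFoldl_eq_collapse, pvRuns_eq_collapse, List.nil_append]
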